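-- pv_equiv track=rewrite | github.com/sahilpatel495/AI-Code-Reviewer-Bot | complete-upload/services/ai_service.py | _detect_language_and_framework
-- ===== SOURCE A (Python) =====
-- from typing import Dict, List, Any, Optional, Tuple
--
-- def _detect_language_and_framework(file_paths: List[str], languages: Dict[str, int]) -> Tuple[str, str]:
--     """Detect the primary language and framework from file paths and language stats."""
--     # Determine primary language from GitHub language stats
--     primary_language = max(languages.items(), key=lambda x: x[1])[0].lower() if languages else "unknown"
--
--     # Detect framework from file paths
--     framework = "unknown"
--
--     # Check for common frameworks
--     if any("package.json" in path for path in file_paths):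
--         # Check for React, Next.js, Angular, etc.
--         if any("next.config" in path for path in file_paths):
--             framework = "Next.js"
--         elif any("angular.json" in path for path in file_paths):
--             framework = "Angular"
--         elif any("src/components" in path for path in file_paths):
--             framework = "React"
--         else:
--             framework = "Node.js"
--     elif any("requirements.txt" in path for path in file_paths):
--         # Check for Django, Flask, FastAPI, etc.
--         if any("django" in path for path in file_paths):
--             framework = "Django"
--         elif any("flask" in path for path in file_paths):
--             framework = "Flask"
--         elif any("fastapi" in path for path in file_paths):
--             framework = "FastAPI"
--         else:
--             framework = "Python"
--     elif any("pom.xml" in path for path in file_paths):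
--         framework = "Maven"
--     elif any("build.gradle" in path for path in file_paths):
--         framework = "Gradle"
--
--     return primary_language, framework
-- ===== SOURCE B (Python) =====
-- def _detect_language_and_framework(file_paths, languages):
--     """Single pass over file_paths building marker flags, then branch on the flags."""
--     primary_language = max(languages.items(), key=lambda x: x[1])[0].lower() if languages else "unknown"
--
--     pkg = nxt = ang = comp = req = dj = fl = fa = pom = gradle = False
--     for p in file_paths:
--         pkg = pkg or "package.json" in p
--         nxt = nxt or "next.config" in p
--         ang = ang or "angular.json" in p
--         comp = comp or "src/components" in p
--         req = req or "requirements.txt" in p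
--         dj = dj or "django" in p
--         fl = fl or "flask" in p
--         fa = fa or "fastapi" in p
--         pom = pom or "pom.xml" in p
--         gradle = gradle or "build.gradle" in p
--
--     if pkg:
--         framework = "Next.js" if nxt else "Angular" if ang else "React" if comp else "Node.js"
--     elif req:
--         framework = "Django" if dj else "Flask" if fl else "FastAPI" if fa else "Python"
--     elif pom:
--         framework = "Maven"
--     elif gradle:
--         framework = "Gradle"
--     else:
--         framework = "unknown"
--     return primary_language, framework
-- ===== Notes on version B (the rewrite author's own statement) =====
-- stated objective: alternative
-- what changed: B replaces A's ten independent any(...) scans over file_paths with a single loop that ORs ten marker flags, then picks the framework by branching on the precomputed flags in A's precedence order (language max unchanged).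
import Mathlib
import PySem

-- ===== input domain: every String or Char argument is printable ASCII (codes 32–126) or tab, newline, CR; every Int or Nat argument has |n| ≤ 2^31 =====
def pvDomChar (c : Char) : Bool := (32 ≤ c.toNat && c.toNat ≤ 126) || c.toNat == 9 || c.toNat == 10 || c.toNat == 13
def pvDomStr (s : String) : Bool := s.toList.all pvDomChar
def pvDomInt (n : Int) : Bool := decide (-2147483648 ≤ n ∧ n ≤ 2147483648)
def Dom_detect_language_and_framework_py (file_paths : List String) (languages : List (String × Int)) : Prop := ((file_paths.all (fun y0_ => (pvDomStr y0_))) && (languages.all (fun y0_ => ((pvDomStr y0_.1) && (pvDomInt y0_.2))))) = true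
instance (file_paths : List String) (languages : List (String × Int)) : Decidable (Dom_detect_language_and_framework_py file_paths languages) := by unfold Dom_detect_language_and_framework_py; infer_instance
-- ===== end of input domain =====

-- B replaces A's ten separate any(...) scans over file_paths with ONE fold that ORs all marker
-- flags, then branches on the flags in A's precedence order (objective: alternative).


-- ===== PORT A =====
def detect_language_and_framework_py (file_paths : List String) (languages : List (String × Int)) : String × String :=
  -- primary_language = max(languages.items(), key=lambda x: x[1])[0].lower() if languages else "unknown"
  let primary_language :=
    match PySem.List.max? languages (fun x => x.2) with
    | some m => PySem.Str.lower m.1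
    | none => "unknown"
  -- the if/elif cascade of any(sub in path for path in file_paths) tests
  let framework :=
    if file_paths.any (fun p => PySem.Str.isIn "package.json" p) then
      if file_paths.any (fun p => PySem.Str.isIn "next.config" p) then "Next.js"
      else if file_paths.any (fun p => PySem.Str.isIn "angular.json" p) then "Angular"
      else if file_paths.any (fun p => PySem.Str.isIn "src/components" p) then "React"
      else "Node.js"
    else if file_paths.any (fun p => PySem.Str.isIn "requirements.txt" p) then
      if file_paths.any (fun p => PySem.Str.isIn "django" p) then "Django"
      else if file_paths.any (fun p => PySem.Str.isIn "flask" p) then "Flask"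
      else if file_paths.any (fun p => PySem.Str.isIn "fastapi" p) then "FastAPI"
      else "Python"
    else if file_paths.any (fun p => PySem.Str.isIn "pom.xml" p) then "Maven"
    else if file_paths.any (fun p => PySem.Str.isIn "build.gradle" p) then "Gradle"
    else "unknown"
  (primary_language, framework)

-- ===== PORT B =====
-- one fold over file_paths accumulating the ten marker flags (the for-loop of Source B)
def pvFlags (file_paths : List String)
    : Bool × Bool × Bool × Bool × Bool × Bool × Bool × Bool × Bool × Bool :=
  file_paths.foldl
    (fun st p =>
      (st.1 || PySem.Str.isIn "package.json" p,
       st.2.1 || PySem.Str.isIn "next.config" p,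
       st.2.2.1 || PySem.Str.isIn "angular.json" p,
       st.2.2.2.1 || PySem.Str.isIn "src/components" p,
       st.2.2.2.2.1 || PySem.Str.isIn "requirements.txt" p,
       st.2.2.2.2.2.1 || PySem.Str.isIn "django" p,
       st.2.2.2.2.2.2.1 || PySem.Str.isIn "flask" p,
       st.2.2.2.2.2.2.2.1 || PySem.Str.isIn "fastapi" p,
       st.2.2.2.2.2.2.2.2.1 || PySem.Str.isIn "pom.xml" p,
       st.2.2.2.2.2.2.2.2.2 || PySem.Str.isIn "build.gradle" p))
    (false, false, false, false, false, false, false, false, false, false)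

def detect_language_and_framework_py_alt (file_paths : List String) (languages : List (String × Int)) : String × String :=
  let primary_language :=
    match PySem.List.max? languages (fun x => x.2) with
    | some m => PySem.Str.lower m.1
    | none => "unknown"
  let f := pvFlags file_paths
  let framework :=
    if f.1 then
      if f.2.1 then "Next.js"
      else if f.2.2.1 then "Angular"
      else if f.2.2.2.1 then "React"
      else "Node.js"
    else if f.2.2.2.2.1 then
      if f.2.2.2.2.2.1 then "Django"
      else if f.2.2.2.2.2.2.1 then "Flask"
      else if f.2.2.2.2.2.2.2.1 then "FastAPI"
      else "Python"
    else if f.2.2.2.2.2.2.2.2.1 then "Maven"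
    else if f.2.2.2.2.2.2.2.2.2 then "Gradle"
    else "unknown"
  (primary_language, framework)

-- ===== PRECONDITION & SPEC =====
def Spec_detect_language_and_framework_py (file_paths : List String) (languages : List (String × Int)) (out : String × String) : Prop := out = detect_language_and_framework_py_alt file_paths languages
instance (file_paths : List String) (languages : List (String × Int)) (out : String × String) : Decidable (Spec_detect_language_and_framework_py file_paths languages out) := by unfold Spec_detect_language_and_framework_py; infer_instance

-- ===== CLAIM (what is proved, stated in full; the proofs are below) =====
def Claim_equal_detect_language_and_framework_py : Prop := ∀ (file_paths : List String) (languages : List (String × Int)), Dom_detect_language_and_framework_py file_paths languages → Spec_detect_language_and_framework_py file_paths languages (detect_language_and_framework_py file_paths languages)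

-- ===== LEMMAS AND PROOFS =====
-- Each component of the flag fold is the corresponding any-scan, ORed onto the start state.
theorem pvFlags_foldl_eq (file_paths : List String)
    (st : Bool × Bool × Bool × Bool × Bool × Bool × Bool × Bool × Bool × Bool) :
    file_paths.foldl
      (fun st p =>
        (st.1 || PySem.Str.isIn "package.json" p,
         st.2.1 || PySem.Str.isIn "next.config" p,
         st.2.2.1 || PySem.Str.isIn "angular.json" p,
         st.2.2.2.1 || PySem.Str.isIn "src/components" p,
         st.2.2.2.2.1 || PySem.Str.isIn "requirements.txt" p,
         st.2.2.2.2.2.1 || PySem.Str.isIn "django" p,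
         st.2.2.2.2.2.2.1 || PySem.Str.isIn "flask" p,
         st.2.2.2.2.2.2.2.1 || PySem.Str.isIn "fastapi" p,
         st.2.2.2.2.2.2.2.2.1 || PySem.Str.isIn "pom.xml" p,
         st.2.2.2.2.2.2.2.2.2 || PySem.Str.isIn "build.gradle" p)) st
    = (st.1 || file_paths.any (fun p => PySem.Str.isIn "package.json" p),
       st.2.1 || file_paths.any (fun p => PySem.Str.isIn "next.config" p),
       st.2.2.1 || file_paths.any (fun p => PySem.Str.isIn "angular.json" p),
       st.2.2.2.1 || file_paths.any (fun p => PySem.Str.isIn "src/components" p),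
       st.2.2.2.2.1 || file_paths.any (fun p => PySem.Str.isIn "requirements.txt" p),
       st.2.2.2.2.2.1 || file_paths.any (fun p => PySem.Str.isIn "django" p),
       st.2.2.2.2.2.2.1 || file_paths.any (fun p => PySem.Str.isIn "flask" p),
       st.2.2.2.2.2.2.2.1 || file_paths.any (fun p => PySem.Str.isIn "fastapi" p),
       st.2.2.2.2.2.2.2.2.1 || file_paths.any (fun p => PySem.Str.isIn "pom.xml" p),
       st.2.2.2.2.2.2.2.2.2 || file_paths.any (fun p => PySem.Str.isIn "build.gradle" p)) := by
  induction file_paths generalizing st with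
  | nil => simp
  | cons h t ih => rw [List.foldl_cons, ih]; simp [List.any_cons, Bool.or_assoc]

theorem pvFlags_eq (file_paths : List String) :
    pvFlags file_paths
    = (file_paths.any (fun p => PySem.Str.isIn "package.json" p),
       file_paths.any (fun p => PySem.Str.isIn "next.config" p),
       file_paths.any (fun p => PySem.Str.isIn "angular.json" p),
       file_paths.any (fun p => PySem.Str.isIn "src/components" p),
       file_paths.any (fun p => PySem.Str.isIn "requirements.txt" p),
       file_paths.any (fun p => PySem.Str.isIn "django" p),
       file_paths.any (fun p => PySem.Str.isIn "flask" p),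
       file_paths.any (fun p => PySem.Str.isIn "fastapi" p),
       file_paths.any (fun p => PySem.Str.isIn "pom.xml" p),
       file_paths.any (fun p => PySem.Str.isIn "build.gradle" p)) := by
  simpa using pvFlags_foldl_eq file_paths
    (false, false, false, false, false, false, false, false, false, false)

-- ===== VERDICT (by name: the statement is the Claim_ definition above) =====
theorem detect_language_and_framework_py_spec : Claim_equal_detect_language_and_framework_py := by
  intro file_paths languages _
  unfold Spec_detect_language_and_framework_py
  unfold detect_language_and_framework_py detect_language_and_framework_py_alt
  rw [pvFlags_eq]
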